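-- pv_equiv track=rewrite | github.com/kimseongwonn/Data | python_practice/level_0/python_practice_008.py | solution
-- ===== SOURCE A (Python) =====
-- def solution(code):
--     ret = ""
--     mode = 0
--
--     for i in range(len(code)):
--         if code[i] == "1":
--             mode = 1 - mode
--
--         else:
--             if mode == 0 and i % 2 == 0:
--                 ret += code[i]
--             elif mode == 1 and i % 2 == 1:
--                 ret += code[i]
--
--     if len(ret) == 0:
--         return "EMPTY"
--
--     else:
--         return ret
-- ===== SOURCE B (Python) =====
-- def solution(code):
--     # phase 1: prefix-parity table; parity[i] = (number of "1"s in code[:i]) % 2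
--     parity = [0]
--     for c in code:
--         parity.append(1 - parity[-1] if c == "1" else parity[-1])
--     # phase 2: keep code[i] when it is not "1" and parity matches index parity
--     kept = [c for i, c in enumerate(code) if c != "1" and parity[i] == i % 2]
--     return "".join(kept) or "EMPTY"
-- ===== Notes on version B (the rewrite author's own statement) =====
-- stated objective: alternative
-- what changed: Replaces A's fused stateful loop (mutable mode toggled while filtering) with a two-phase table-then-filter structure: first build a prefix-parity table of '1'-counts, then a list comprehension keeps code[i] exactly when code[i] != '1' and parity[i] == i % 2.
import Mathlib
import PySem

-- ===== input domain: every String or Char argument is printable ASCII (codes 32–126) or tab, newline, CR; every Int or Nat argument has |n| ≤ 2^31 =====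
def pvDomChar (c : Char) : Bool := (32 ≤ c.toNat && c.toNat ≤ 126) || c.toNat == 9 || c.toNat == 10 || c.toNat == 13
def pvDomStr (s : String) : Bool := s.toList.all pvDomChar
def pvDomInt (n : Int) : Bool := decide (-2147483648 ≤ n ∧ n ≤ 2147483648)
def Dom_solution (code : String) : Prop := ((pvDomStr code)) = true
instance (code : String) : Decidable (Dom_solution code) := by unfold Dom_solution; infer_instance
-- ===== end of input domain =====

-- B replaces A's fused stateful loop by a two-phase structure (prefix-parity table, then a
-- filtering comprehension); same O(n) cost, objective: alternative decomposition.

-- ===== PORT A =====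
-- A's loop body; ret is kept as a List Char and joined at the end (Python's ret += code[i]
-- appends one character).  `i % 2` is exact: the index is ≥ 0 and the divisor 2 is positive,
-- so Lean's % on Int agrees with Python's %.
def pvStepA (st : List Char × Int) (ic : Int × Char) : List Char × Int :=
  if ic.2 = '1' then (st.1, 1 - st.2)
  else if st.2 = 0 ∧ ic.1 % 2 = 0 then (st.1 ++ [ic.2], st.2)
  else if st.2 = 1 ∧ ic.1 % 2 = 1 then (st.1 ++ [ic.2], st.2)
  else st

-- `for i in range(len(code))` with `code[i]` is ported as a fold over the enumerated characters.
def solution (code : String) : String :=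
  let r := (PySem.List.enumerate code.toList 0).foldl pvStepA ([], 0)
  if r.1.length = 0 then "EMPTY" else String.ofList r.1

-- ===== PORT B =====
-- one step of B's parity-table loop: parity.append(1 - parity[-1] if c == "1" else parity[-1])
def pvStepP (ps : List Int) (c : Char) : List Int :=
  ps ++ [if c = '1' then 1 - PySem.List.pyGetD ps (-1) 0 else PySem.List.pyGetD ps (-1) 0]

-- B's comprehension filter: keep (i, c) when c != "1" and parity[i] == i % 2
def pvKeep (parity : List Int) (ic : Int × Char) : Bool :=
  decide (ic.2 ≠ '1' ∧ PySem.List.pyGetD parity ic.1 0 = ic.1 % 2)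

def solution_alt (code : String) : String :=
  let cs := code.toList
  let parity := cs.foldl pvStepP [0]
  let kept := ((PySem.List.enumerate cs 0).filter (pvKeep parity)).map (·.2)
  let s := String.ofList kept
  if s = "" then "EMPTY" else s

-- ===== PRECONDITION & SPEC =====
def Spec_solution (code : String) (out : String) : Prop := out = solution_alt code
instance (code : String) (out : String) : Decidable (Spec_solution code out) := by unfold Spec_solution; infer_instance

-- ===== CLAIM (what is proved, stated in full; the proofs are below) =====
def Claim_equal_solution : Prop := ∀ (code : String), Dom_solution code → Spec_solution code (solution code)

-- ===== LEMMAS AND PROOFS =====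

-- the parity step as a plain function
def pvG (p : Int) (c : Char) : Int := if c = '1' then 1 - p else p

-- common skeleton both ports are reduced to
def pvAux : Int → Int → List Char → List Char
  | _, _, [] => []
  | i, m, c :: l =>
    if c = '1' then pvAux (i + 1) (1 - m) l
    else if m = 0 ∧ i % 2 = 0 then c :: pvAux (i + 1) m l
    else if m = 1 ∧ i % 2 = 1 then c :: pvAux (i + 1) m l
    else pvAux (i + 1) m l

theorem pvfoldA (l : List Char) : ∀ (i m : Int) (ret : List Char),
    ((PySem.List.enumerate l i).foldl pvStepA (ret, m)).1 = ret ++ pvAux i m l := by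
  induction l with
  | nil => intro i m ret; simp [PySem.List.enumerate_nil, pvAux]
  | cons c l ih =>
    intro i m ret
    simp only [PySem.List.enumerate_cons, List.foldl_cons, pvStepA, pvAux]
    split_ifs with h1 h2 h3 <;> simp [ih]

theorem pvscan (l : List Char) : ∀ (pre : List Int) (m : Int),
    List.foldl pvStepP (pre ++ [m]) l = pre ++ List.scanl pvG m l := by
  induction l with
  | nil => intro pre m; simp [List.scanl]
  | cons c l ih =>
    intro pre m
    have hstep : pvStepP (pre ++ [m]) c = (pre ++ [m]) ++ [pvG m c] := by
      simp [pvStepP, pvG, PySem.List.pyGetD_neg_one_append_singleton]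
    calc List.foldl pvStepP (pre ++ [m]) (c :: l)
        = List.foldl pvStepP ((pre ++ [m]) ++ [pvG m c]) l := by rw [List.foldl_cons, hstep]
      _ = (pre ++ [m]) ++ List.scanl pvG (pvG m c) l := ih (pre ++ [m]) (pvG m c)
      _ = pre ++ List.scanl pvG m (c :: l) := by rw [List.scanl_cons]; simp

theorem pvget_scan (l : List Char) : ∀ (m : Int) (j : Nat), j ≤ l.length →
    PySem.List.pyGetD (List.scanl pvG m l) (↑j) 0 = List.foldl pvG m (l.take j) := by
  induction l with
  | nil =>
    intro m j hj
    have hj0 : j = 0 := Nat.le_zero.mp hj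
    subst hj0
    simp [List.scanl_nil]
  | cons c l ih =>
    intro m j hj
    cases j with
    | zero => simp [List.scanl_cons]
    | succ j =>
      have h := ih (pvG m c) j (by simpa using hj)
      rw [PySem.List.pyGetD_natCast] at h ⊢
      simpa [List.scanl_cons] using h

theorem pvfoldB (parity : List Int) (l : List Char) : ∀ (k : Nat) (m : Int),
    (m = 0 ∨ m = 1) →
    (∀ j : Nat, j ≤ l.length → PySem.List.pyGetD parity (↑(k + j)) 0 = List.foldl pvG m (l.take j)) →
    ((PySem.List.enumerate l (↑k)).filter (pvKeep parity)).map (·.2) = pvAux (↑k) m l := by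
  induction l with
  | nil => intro k m _ _; simp [PySem.List.enumerate_nil, pvAux]
  | cons c l ih =>
    intro k m hm hget
    have hget0 : PySem.List.pyGetD parity (↑k) 0 = m := by
      simpa using hget 0 (by simp)
    have hcast : (↑k : Int) + 1 = ↑(k + 1) := by push_cast; ring
    have hget' : ∀ j : Nat, j ≤ l.length →
        PySem.List.pyGetD parity (↑(k + 1 + j)) 0 = List.foldl pvG (pvG m c) (l.take j) := by
      intro j hj
      have := hget (j + 1) (by simp; omega)
      simpa [Nat.add_comm, Nat.add_assoc, Nat.add_left_comm, List.foldl_cons] using this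
    by_cases h1 : c = '1'
    · have hkeep : pvKeep parity ((↑k : Int), c) = false := by
        simp [pvKeep, h1]
      simp only [PySem.List.enumerate_cons, List.filter_cons, pvAux, h1, if_true, hcast]
      exact ih (k + 1) (1 - m) (by omega) (by simpa [pvG, h1] using hget')
    · have hpv : pvG m c = m := by simp [pvG, h1]
      have hrest := ih (k + 1) m hm (by simpa [hpv] using hget')
      have hcond : (m = (↑k : Int) % 2) ↔ ((m = 0 ∧ (↑k : Int) % 2 = 0) ∨ (m = 1 ∧ (↑k : Int) % 2 = 1)) := by
        omega
      by_cases h2 : m = (↑k : Int) % 2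
      · have hkeep : pvKeep parity ((↑k : Int), c) = true := by
          simp [pvKeep, h1, hget0, h2.symm]
        simp only [PySem.List.enumerate_cons, List.filter_cons, hkeep, if_true, List.map_cons,
          pvAux, hcast]
        rw [if_neg h1]
        rcases hcond.mp h2 with ⟨ha, hb⟩ | ⟨ha, hb⟩
        · rw [if_pos ⟨ha, hb⟩, hrest]
        · rw [if_neg (by rintro ⟨h0, -⟩; omega), if_pos ⟨ha, hb⟩, hrest]
      · have hkeep : pvKeep parity ((↑k : Int), c) = false := by
          simp [pvKeep, h1, hget0]
          omega
        have hnot : ¬ ((m = 0 ∧ (↑k : Int) % 2 = 0) ∨ (m = 1 ∧ (↑k : Int) % 2 = 1)) := fun h => h2 (hcond.mpr h)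
        simp only [PySem.List.enumerate_cons, List.filter_cons, hkeep, Bool.false_eq_true,
          if_false, pvAux, h1, hcast]
        rw [if_neg (fun h => hnot (Or.inl h)), if_neg (fun h => hnot (Or.inr h))]
        exact hrest

-- ===== VERDICT (by name: the statement is the Claim_ definition above) =====
theorem solution_spec : Claim_equal_solution := by
  intro code _
  unfold Spec_solution solution solution_alt
  have hA : ((PySem.List.enumerate code.toList 0).foldl pvStepA ([], 0)).1
      = pvAux 0 0 code.toList := by
    simpa using pvfoldA code.toList 0 0 []
  have hpar : code.toList.foldl pvStepP [0] = List.scanl pvG 0 code.toList := by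
    simpa using pvscan code.toList [] 0
  have hB : ((PySem.List.enumerate code.toList 0).filter
        (pvKeep (code.toList.foldl pvStepP [0]))).map (·.2) = pvAux 0 0 code.toList := by
    have := pvfoldB (List.scanl pvG 0 code.toList) code.toList 0 0 (Or.inl rfl)
      (fun j hj => by simpa using pvget_scan code.toList 0 j hj)
    simpa [hpar] using this
  simp only [hA, hB]
  by_cases h : pvAux 0 0 code.toList = []
  · simp [h]
  · have hlen : ¬ (pvAux 0 0 code.toList).length = 0 := by
      simpa [List.length_eq_zero_iff] using h
    have hne : ¬ String.ofList (pvAux 0 0 code.toList) = "" := by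
      intro hh; exact h (by simpa using congrArg String.toList hh)
    rw [if_neg hlen, if_neg hne]
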